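-- pv_equiv track=rewrite | github.com/brndngln/AIFOLIO_FINAL_V12 | tools/refactoring_engine.py | _fix_duplicate_code
-- ===== SOURCE A (Python) =====
-- from typing import Any, Dict, List, Optional, Set, Tuple, Union
--
-- def _fix_duplicate_code(content: str) -> Tuple[str, List[str]]:
--     """Extract duplicate code into functions."""
--     fixes = []
--
--     # Simple duplicate detection - look for repeated patterns
--     lines = content.split("\n")
--     line_counts = {}
--
--     for line in lines:
--         stripped = line.strip()
--         if len(stripped) > 20 and not stripped.startswith(("#", '"""', "'''")):
--             line_counts[stripped] = line_counts.get(stripped, 0) + 1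
--
--     duplicates = {line: count for line, count in line_counts.items() if count > 2}
--
--     if duplicates:
--         fixes.append(f"found_{len(duplicates)}_duplicate_lines")
--         # In a full implementation, we would extract these into functions
--
--     return content, fixes
-- ===== SOURCE B (Python) =====
-- from typing import Any, Dict, List, Optional, Set, Tuple, Union
--
-- def _fix_duplicate_code(content: str) -> Tuple[str, List[str]]:
--     """Extract duplicate code into functions (sort-then-scan duplicate count)."""
--     kept = [s for s in (line.strip() for line in content.split("\n"))
--             if len(s) > 20 and not s.startswith(("#", '"""', "'''"))]
--     ordered = sorted(kept)
--     n = 0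
--     prev = None
--     run = 0
--     for s in ordered:
--         if prev is not None and s == prev:
--             run += 1
--         else:
--             if run > 2:
--                 n += 1
--             prev = s
--             run = 1
--     if run > 2:
--         n += 1
--     fixes = []
--     if n > 0:
--         fixes.append(f"found_{n}_duplicate_lines")
--     return content, fixes
-- ===== Notes on version B (the rewrite author's own statement) =====
-- stated objective: alternative
-- what changed: Replaces A's dict-based occurrence counting (hash map built line by line, then a dict comprehension over its items) with a sort-then-scan strategy: the kept stripped lines are sorted and a single linear pass over consecutive runs counts how many distinct lines occur more than twice.
import Mathlib
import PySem

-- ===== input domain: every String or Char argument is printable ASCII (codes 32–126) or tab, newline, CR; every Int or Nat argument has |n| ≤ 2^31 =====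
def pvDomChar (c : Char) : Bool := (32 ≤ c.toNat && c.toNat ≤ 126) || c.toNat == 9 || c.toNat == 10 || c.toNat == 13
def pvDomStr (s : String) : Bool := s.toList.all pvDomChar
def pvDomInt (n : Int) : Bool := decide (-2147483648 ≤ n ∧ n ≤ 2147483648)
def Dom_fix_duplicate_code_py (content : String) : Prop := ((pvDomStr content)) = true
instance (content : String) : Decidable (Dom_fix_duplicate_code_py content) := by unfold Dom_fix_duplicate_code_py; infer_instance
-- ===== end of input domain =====

-- B replaces A's hash-map counting with a sort-then-scan over consecutive runs; objective: alternative (same observable behaviour).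

-- shared filter predicate (the identical condition appears in both Pythons): stripped line
-- longer than 20 chars and not starting with "#", '"""' or "'''"
def pvCond (s : String) : Bool :=
  decide (PySem.Str.len s > 20) &&
    !(PySem.Str.startswith s "#" || PySem.Str.startswith s "\"\"\"" || PySem.Str.startswith s "'''")

-- ===== PORT A =====
def fix_duplicate_code_py (content : String) : String × List String :=
  let lines := (PySem.Str.split? content "\n").getD []   -- sep "\n" ≠ "": split? never raises
  let line_counts : PySem.Dict String Int :=
    lines.foldl (fun d line =>
      let stripped := PySem.Str.strip line
      if pvCond stripped then d.insert stripped (d.getD stripped 0 + 1) else d)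
      PySem.Dict.empty
  let duplicates := PySem.Dict.ofList (line_counts.items.filter (fun p => decide (p.2 > 2)))
  let fixes : List String :=
    if duplicates.size ≠ 0 then
      ["found_" ++ PySem.Int.toStr (duplicates.size : Int) ++ "_duplicate_lines"]
    else []
  (content, fixes)

-- ===== PORT B =====
-- one step of B's linear scan over the sorted kept lines: state (prev, run, n)
def pvStep (st : Option String × Int × Int) (s : String) : Option String × Int × Int :=
  match st with
  | (some p, run, n) =>
      if s == p then (some p, run + 1, n)
      else (some s, 1, n + (if run > 2 then 1 else 0))
  | (none, run, n) => (some s, 1, n + (if run > 2 then 1 else 0))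

def fix_duplicate_code_py_alt (content : String) : String × List String :=
  let lines := (PySem.Str.split? content "\n").getD []
  let kept := (lines.map (fun line => PySem.Str.strip line)).filter pvCond
  let ordered := PySem.List.sorted kept (fun x => x) false
  let st := ordered.foldl pvStep ((none : Option String), (0 : Int), (0 : Int))
  let n : Int := st.2.2 + (if st.2.1 > 2 then 1 else 0)
  (content, if n > 0 then ["found_" ++ PySem.Int.toStr n ++ "_duplicate_lines"] else [])

-- ===== PRECONDITION & SPEC =====
def Spec_fix_duplicate_code_py (content : String) (out : String × List String) : Prop := out = fix_duplicate_code_py_alt content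
instance (content : String) (out : String × List String) : Decidable (Spec_fix_duplicate_code_py content out) := by unfold Spec_fix_duplicate_code_py; infer_instance

-- ===== CLAIM (what is proved, stated in full; the proofs are below) =====
def Claim_equal_fix_duplicate_code_py : Prop := ∀ (content : String), Dom_fix_duplicate_code_py content → Spec_fix_duplicate_code_py content (fix_duplicate_code_py content)

-- ===== LEMMAS AND PROOFS =====

-- B's flush of the final pending run
def pvFinal (st : Option String × Int × Int) : Int := st.2.2 + (if st.2.1 > 2 then 1 else 0)

-- A's counting loop, with the filter folded in, is the plain counting loop over the kept lines
theorem pvFoldIf (lines : List String) (d : PySem.Dict String Int) :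
    lines.foldl (fun d line =>
      let stripped := PySem.Str.strip line
      if pvCond stripped then d.insert stripped (d.getD stripped 0 + 1) else d) d
    = ((lines.map (fun line => PySem.Str.strip line)).filter pvCond).foldl
        (fun d s => d.insert s (d.getD s 0 + 1)) d := by
  induction lines generalizing d with
  | nil => simp
  | cons x xs ih =>
      simp only [List.foldl_cons, List.map_cons, List.filter_cons]
      cases h : pvCond (PySem.Str.strip x) with
      | true => simp only [if_true, List.foldl_cons]; exact ih _
      | false => simp only [Bool.false_eq_true, if_false]; exact ih _

-- splitting the more-than-twice count of x :: l at its head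
theorem pvSplit (l : List String) (x : String) :
    ((PySem.Set.ofList (x :: l)).countP (fun v => decide (((x :: l).count v : Int) > 2)) : Int)
    = (if (1 : Int) + (l.count x : Int) > 2 then 1 else 0)
      + (((PySem.Set.ofList l).filter (fun v => !(v == x))).countP
          (fun v => decide ((l.count v : Int) > 2)) : Int) := by
  rw [PySem.Set.ofList_cons, List.countP_cons]
  have h1 : List.countP (fun v => decide (((x :: l).count v : Int) > 2)) ((PySem.Set.ofList l).discard x)
      = List.countP (fun v => decide ((l.count v : Int) > 2)) ((PySem.Set.ofList l).filter (fun v => !(v == x))) := by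
    simp only [PySem.Set.discard]
    apply List.countP_congr
    intro v hv
    have hvx : v ≠ x := by
      have := List.of_mem_filter hv; simpa using this
    rw [List.count_cons_of_ne (Ne.symm hvx)]
  rw [h1]
  have h2 : (decide (((x :: l).count x : Int) > 2)) = (decide ((1 : Int) + (l.count x : Int) > 2)) := by
    rw [decide_eq_decide]
    simp [List.count_cons_self]
    omega
  rw [h2]
  by_cases hc : (1 : Int) + (l.count x : Int) > 2
  · simp [Int.add_comm]
  · simp [hc]

-- B's scan over a sorted tail l, with pending run (x, run) and accumulated count n
theorem pvRun (l : List String) (x : String) (run n : Int)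
    (hall : ∀ y ∈ l, x ≤ y) (hp : l.Pairwise (· ≤ ·)) :
    pvFinal (l.foldl pvStep (some x, run, n)) =
      n + (if run + (l.count x : Int) > 2 then 1 else 0)
        + (((PySem.Set.ofList l).filter (fun v => !(v == x))).countP
            (fun v => decide ((l.count v : Int) > 2)) : Int) := by
  induction l generalizing x run n with
  | nil => simp [pvFinal]
  | cons y l ih =>
      obtain ⟨hy, hp'⟩ := List.pairwise_cons.mp hp
      rw [List.foldl_cons]
      by_cases hyx : y = x
      · subst hyx
        have hstep : pvStep (some y, run, n) y = (some y, run + 1, n) := by simp [pvStep]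
        rw [hstep, ih y (run + 1) n (fun z hz => hy z hz) hp']
        have hcnt : (((y :: l).count y : Int)) = (l.count y : Int) + 1 := by
          rw [List.count_cons_self]; push_cast; ring
        rw [hcnt]
        have hset : ((PySem.Set.ofList (y :: l)).filter (fun v => !(v == y)))
            = ((PySem.Set.ofList l).filter (fun v => !(v == y))) := by
          rw [PySem.Set.ofList_cons]
          simp only [PySem.Set.discard, List.filter_cons, List.filter_filter]
          simp
        rw [hset]
        have hcp : List.countP (fun v => decide (((y :: l).count v : Int) > 2))
              ((PySem.Set.ofList l).filter (fun v => !(v == y)))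
            = List.countP (fun v => decide ((l.count v : Int) > 2))
              ((PySem.Set.ofList l).filter (fun v => !(v == y))) := by
          apply List.countP_congr
          intro v hv
          have hvx : v ≠ y := by
            have := List.of_mem_filter hv; simpa using this
          rw [List.count_cons_of_ne (Ne.symm hvx)]
        rw [hcp]
        have : run + ((l.count y : Int) + 1) = run + 1 + (l.count y : Int) := by ring
        rw [this]
      · have hxy : x ≤ y := hall y (List.mem_cons_self)
        have hlt : x < y := lt_of_le_of_ne hxy (Ne.symm hyx)
        have hnx : ∀ z ∈ l, x < z := fun z hz => lt_of_lt_of_le hlt (hy z hz)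
        have hxnotin : x ∉ l := fun h => lt_irrefl x (hnx x h)
        have hstep : pvStep (some x, run, n) y
            = (some y, (1 : Int), n + (if run > 2 then 1 else 0)) := by
          simp [pvStep, hyx]
        rw [hstep, ih y 1 _ (fun z hz => hy z hz) hp']
        have hcx : ((y :: l).count x : Int) = 0 := by
          have : x ∉ (y :: l) := by
            intro h; rcases List.mem_cons.mp h with h | h
            · exact hyx (h.symm)
            · exact hxnotin h
          simp [List.count_eq_zero_of_not_mem this]
        rw [hcx]
        have hset : ((PySem.Set.ofList (y :: l)).filter (fun v => !(v == x)))
            = y :: ((PySem.Set.ofList l).filter (fun v => !(v == y))) := by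
          rw [PySem.Set.ofList_cons]
          simp only [PySem.Set.discard, List.filter_cons, List.filter_filter]
          have hyneq : (!(y == x)) = true := by simp [hyx]
          rw [if_pos hyneq]
          congr 1
          apply List.filter_congr
          intro v hv
          have hvl : v ∈ l := (PySem.Set.mem_ofList l v).mp hv
          have : v ≠ x := fun h => lt_irrefl x (h ▸ hnx v hvl)
          simp [this]
        rw [hset, List.countP_cons]
        have hcy : ((y :: l).count y : Int) = (l.count y : Int) + 1 := by
          rw [List.count_cons_self]; push_cast; ring
        have hcp : List.countP (fun v => decide (((y :: l).count v : Int) > 2))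
              ((PySem.Set.ofList l).filter (fun v => !(v == y)))
            = List.countP (fun v => decide ((l.count v : Int) > 2))
              ((PySem.Set.ofList l).filter (fun v => !(v == y))) := by
          apply List.countP_congr
          intro v hv
          have hvx : v ≠ y := by
            have := List.of_mem_filter hv; simpa using this
          rw [List.count_cons_of_ne (Ne.symm hvx)]
        rw [hcp]
        have hdy : (decide (((y :: l).count y : Int) > 2))
            = (decide ((1 : Int) + (l.count y : Int) > 2)) := by
          rw [decide_eq_decide, hcy]; omega
        rw [hdy]
        push_cast
        by_cases h1 : (1 : Int) + (l.count y : Int) > 2 <;> by_cases h2 : run > 2 <;>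
          simp [h1, h2] <;> ring

-- B's scan of a sorted list counts the distinct lines occurring more than twice
theorem pvCount (l : List String) (hp : l.Pairwise (· ≤ ·)) :
    pvFinal (l.foldl pvStep ((none : Option String), (0 : Int), (0 : Int))) =
      ((PySem.Set.ofList l).countP (fun v => decide ((l.count v : Int) > 2)) : Int) := by
  cases l with
  | nil => simp [pvFinal]
  | cons x l =>
      obtain ⟨hy, hp'⟩ := List.pairwise_cons.mp hp
      rw [List.foldl_cons]
      have hstep : pvStep ((none : Option String), (0 : Int), (0 : Int)) x
          = (some x, (1 : Int), (0 : Int)) := by simp [pvStep]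
      rw [hstep, pvRun l x 1 0 hy hp', pvSplit l x]
      ring

-- the count is invariant under sorting
theorem pvPermCount (kept : List String) :
    ((PySem.Set.ofList (PySem.List.sorted kept (fun x => x) false)).countP
        (fun v => decide (((PySem.List.sorted kept (fun x => x) false).count v : Int) > 2)))
    = ((PySem.Set.ofList kept).countP (fun v => decide ((kept.count v : Int) > 2))) := by
  have hperm : (PySem.List.sorted kept (fun x => x) false).Perm kept :=
    PySem.List.sorted_perm kept (fun x => x) false
  have h1 : ((PySem.Set.ofList (PySem.List.sorted kept (fun x => x) false)).countP
        (fun v => decide (((PySem.List.sorted kept (fun x => x) false).count v : Int) > 2)))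
      = ((PySem.Set.ofList (PySem.List.sorted kept (fun x => x) false)).countP
        (fun v => decide ((kept.count v : Int) > 2))) := by
    apply List.countP_congr
    intro v _
    rw [hperm.count_eq v]
  rw [h1]
  apply List.Perm.countP_eq
  rw [List.perm_ext_iff_of_nodup (PySem.Set.nodup_ofList _) (PySem.Set.nodup_ofList _)]
  intro a
  rw [PySem.Set.mem_ofList, PySem.Set.mem_ofList]
  exact hperm.mem_iff

-- a dict built from pairs with distinct keys holds exactly those pairs
theorem pvOfListItems (ps : List (String × Int)) (h : (ps.map Prod.fst).Nodup) :
    (PySem.Dict.ofList ps).items = ps := by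
  have h2 : ∀ a ∈ ps, (PySem.Dict.empty : PySem.Dict String Int).contains a.1 = false :=
    fun a _ => PySem.Dict.contains_empty a.1
  have h3 := PySem.Dict.items_foldl_insert_fresh ps Prod.fst Prod.snd PySem.Dict.empty h2 h
  simpa using h3

-- ===== VERDICT (by name: the statement is the Claim_ definition above) =====
theorem fix_duplicate_code_py_spec : Claim_equal_fix_duplicate_code_py := by
  intro content _
  unfold Spec_fix_duplicate_code_py
  simp only [fix_duplicate_code_py, fix_duplicate_code_py_alt]
  set lines := (PySem.Str.split? content "\n").getD [] with hlines
  set kept := (lines.map (fun line => PySem.Str.strip line)).filter pvCond with hkept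
  rw [pvFoldIf, ← hkept, PySem.Dict.foldl_insert_getD_add_one_eq_counter]
  have hitems : (PySem.Dict.counter kept).items.filter (fun p => decide (p.2 > 2))
      = ((PySem.Set.ofList kept).filter (fun k => decide ((kept.count k : Int) > 2))).map
          (fun k => (k, (kept.count k : Int))) := by
    rw [PySem.Dict.items_counter, List.filter_map]
    rfl
  rw [hitems]
  have hnodup : ((((PySem.Set.ofList kept).filter (fun k => decide ((kept.count k : Int) > 2))).map
      (fun k => (k, (kept.count k : Int)))).map Prod.fst).Nodup := by
    rw [List.map_map]
    have hid : (Prod.fst ∘ fun k : String => (k, (kept.count k : Int))) = id := rfl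
    rw [hid, List.map_id]
    exact List.Nodup.filter _ (PySem.Set.nodup_ofList kept)
  have hsize : (PySem.Dict.ofList (((PySem.Set.ofList kept).filter
        (fun k => decide ((kept.count k : Int) > 2))).map (fun k => (k, (kept.count k : Int))))).size
      = ((PySem.Set.ofList kept).countP (fun k => decide ((kept.count k : Int) > 2))) := by
    show (PySem.Dict.ofList _).items.length = _
    rw [pvOfListItems _ hnodup, List.length_map, List.countP_eq_length_filter]
  have hb : pvFinal ((PySem.List.sorted kept (fun x => x) false).foldl pvStep
        ((none : Option String), (0 : Int), (0 : Int)))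
      = ((PySem.Set.ofList kept).countP (fun k => decide ((kept.count k : Int) > 2)) : Int) := by
    rw [pvCount _ (PySem.List.sorted_pairwise kept (fun x => x)), pvPermCount]
  refine Prod.ext rfl ?_
  show (if _ ≠ 0 then _ else _) = _
  rw [hsize]
  have hb' : ((PySem.List.sorted kept (fun x => x) false).foldl pvStep
        ((none : Option String), (0 : Int), (0 : Int))).2.2
      + (if ((PySem.List.sorted kept (fun x => x) false).foldl pvStep
        ((none : Option String), (0 : Int), (0 : Int))).2.1 > 2 then (1 : Int) else 0)
      = ((PySem.Set.ofList kept).countP (fun k => decide ((kept.count k : Int) > 2)) : Int) := hb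
  rw [hb']
  by_cases h : ((PySem.Set.ofList kept).countP (fun k => decide ((kept.count k : Int) > 2))) = 0
  · rw [h]; simp
  · have hpos : (0 : Int) < ((PySem.Set.ofList kept).countP
        (fun k => decide ((kept.count k : Int) > 2)) : Int) := by
      exact_mod_cast Nat.pos_of_ne_zero h
    rw [if_pos h, if_pos hpos]
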